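-- pv_equiv track=rewrite | github.com/robitec97/aoc-2025 | day02_part1.py | sum_invalid_in_range
-- ===== SOURCE A (Python) =====
-- def sum_invalid_in_range(L: int, R: int) -> int:
--
--     total = 0
--     max_digits = len(str(R))
--
--     # k = number of digits in the half H
--     for k in range(1, max_digits // 2 + 1):
--         m = 10 ** k + 1        # N = H * (10^k + 1)
--         h_min = 10 ** (k - 1)  # smallest k-digit number (no leading zero)
--         h_max = 10 ** k - 1    # largest k-digit number
--
--         # Quick exit: if even the smallest possible N with this k is > R, we're done
--         if h_min * m > R:
--             break
--
--         # For N in [L, R], we need H in [ceil(L/m), floor(R/m)]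
--         h_lo_by_L = (L + m - 1) // m   # ceil(L / m)
--         h_hi_by_R = R // m             # floor(R / m)
--
--         # Intersect with the valid k-digit H range
--         lb = max(h_lo_by_L, h_min)
--         ub = min(h_hi_by_R, h_max)
--
--         if lb <= ub:
--             n = ub - lb + 1
--             # Sum of H from lb to ub is n * (lb + ub) // 2
--             # Sum of N = m * sum(H)
--             total += m * n * (lb + ub) // 2
--
--     return total
-- ===== SOURCE B (Python) =====
-- def sum_invalid_in_range(L: int, R: int) -> int:
--     # Enumerate the "invalid" numbers directly by their half H = 1, 2, 3, ...
--     # N = H followed by H = H * (10**k + 1) where k = number of digits of H.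
--     total = 0
--     H = 1
--     k = 1  # number of digits of H
--     while H * (10 ** k + 1) <= R:
--         N = H * (10 ** k + 1)
--         if N >= L:
--             total += N
--         H += 1
--         if H == 10 ** k:
--             k += 1
--     return total
-- ===== Notes on version B (the rewrite author's own statement) =====
-- stated objective: simpler
-- what changed: A computes the answer per digit-length with ceil/floor interval intersection and a Gauss arithmetic-series formula; B directly enumerates the doubled numbers H*(10^k+1) by their halves H = 1,2,3,... and accumulates those inside [L,R].
import Mathlib
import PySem

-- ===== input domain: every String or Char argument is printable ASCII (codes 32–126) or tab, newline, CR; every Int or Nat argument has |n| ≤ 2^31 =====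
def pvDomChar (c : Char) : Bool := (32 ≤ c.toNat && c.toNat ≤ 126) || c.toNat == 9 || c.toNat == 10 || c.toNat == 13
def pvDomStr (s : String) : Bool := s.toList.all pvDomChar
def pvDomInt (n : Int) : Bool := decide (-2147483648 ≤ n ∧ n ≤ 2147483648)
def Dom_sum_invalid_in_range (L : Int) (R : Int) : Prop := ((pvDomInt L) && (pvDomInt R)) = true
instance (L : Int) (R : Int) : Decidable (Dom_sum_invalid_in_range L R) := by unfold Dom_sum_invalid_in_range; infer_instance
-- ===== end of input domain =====

-- B replaces A's per-digit-length arithmetic-series formulas by a direct enumeration of the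
-- doubled numbers H·(10^k+1) through their halves H = 1, 2, 3, … (simpler, not faster).

-- ===== PORT A =====
-- A's `for k in range(...)` loop with its `break`, one list element per k.
-- `10 ** k` / `10 ** (k-1)` are ported as `10 ^ k.toNat` / `10 ^ (k-1).toNat`, exact here since
-- every k produced by `range(1, …)` satisfies k ≥ 1.
def sumInvalidLoopA (L : Int) (R : Int) : List Int → Int → Int
  | [], total => total
  | k :: ks, total =>
    let m : Int := 10 ^ k.toNat + 1
    let hMin : Int := 10 ^ (k - 1).toNat
    let hMax : Int := 10 ^ k.toNat - 1
    if hMin * m > R then total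
    else
      let hLoByL : Int := PySem.Int.floordiv (L + m - 1) m
      let hHiByR : Int := PySem.Int.floordiv R m
      let lb : Int := max hLoByL hMin
      let ub : Int := min hHiByR hMax
      if lb ≤ ub then
        sumInvalidLoopA L R ks (total + PySem.Int.floordiv (m * (ub - lb + 1) * (lb + ub)) 2)
      else
        sumInvalidLoopA L R ks total

def sum_invalid_in_range (L : Int) (R : Int) : Int :=
  sumInvalidLoopA L R
    (PySem.List.pyRange 1 (PySem.Int.floordiv (PySem.Str.len (PySem.Int.toStr R)) 2 + 1) 1) 0

-- ===== PORT B =====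
-- B's while-loop; k (the digit count of H, only ever used as an exponent and incremented) is a Nat.
def sumInvalidLoopB (L : Int) (R : Int) (total : Int) (H : Int) (k : Nat) : Int :=
  if H * (10 ^ k + 1) ≤ R then
    sumInvalidLoopB L R (if H * (10 ^ k + 1) ≥ L then total + H * (10 ^ k + 1) else total)
      (H + 1) (if H + 1 = 10 ^ k then k + 1 else k)
  else total
termination_by (max R 1 + 1 - H).toNat
decreasing_by
  rename_i h
  have hp : (0:Int) < 10 ^ k := pow_pos (by norm_num) k
  have hH : H ≤ max R 1 := by
    by_cases h1 : 1 ≤ H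
    · have h2 : H * 1 ≤ H * (10 ^ k + 1) := by
        apply mul_le_mul_of_nonneg_left (by omega) (by omega)
      have := le_max_left R 1
      omega
    · have := le_max_right R 1
      omega
  omega

def sum_invalid_in_range_alt (L : Int) (R : Int) : Int :=
  sumInvalidLoopB L R 0 1 1

-- ===== PRECONDITION & SPEC =====
def Spec_sum_invalid_in_range (L : Int) (R : Int) (out : Int) : Prop := out = sum_invalid_in_range_alt L R
instance (L : Int) (R : Int) (out : Int) : Decidable (Spec_sum_invalid_in_range L R out) := by unfold Spec_sum_invalid_in_range; infer_instance

-- ===== CLAIM (what is proved, stated in full; the proofs are below) =====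
def Claim_equal_sum_invalid_in_range : Prop := ∀ (L : Int) (R : Int), Dom_sum_invalid_in_range L R → Spec_sum_invalid_in_range L R (sum_invalid_in_range L R)

-- ===== LEMMAS AND PROOFS =====

-- digit count of H ≥ 1 and the "doubled" value H·(10^ndig H + 1)
def ndig (H : Int) : Nat := Nat.log 10 H.toNat + 1
def gdbl (H : Int) : Int := H * (10 ^ ndig H + 1)
def wgt (L R H : Int) : Int := if L ≤ gdbl H ∧ gdbl H ≤ R then gdbl H else 0

-- A's per-k bounds and per-k contribution (ignoring the break)
def lbA (L k : Int) : Int :=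
  max (PySem.Int.floordiv (L + (10 ^ k.toNat + 1) - 1) (10 ^ k.toNat + 1)) (10 ^ (k - 1).toNat)
def ubA (R k : Int) : Int :=
  min (PySem.Int.floordiv R (10 ^ k.toNat + 1)) (10 ^ k.toNat - 1)
def termA (L R k : Int) : Int :=
  if lbA L k ≤ ubA R k then
    PySem.Int.floordiv ((10 ^ k.toNat + 1) * (ubA R k - lbA L k + 1) * (lbA L k + ubA R k)) 2
  else 0

lemma gauss_int (lb : Int) (n : Nat) :
    (∑ H ∈ Finset.Icc lb (lb + n), H) * 2 = ((n : Int) + 1) * (2 * lb + n) := by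
  induction n with
  | zero => simp; ring
  | succ n ih =>
    have h1 : lb + ((n:Int) + 1) = (lb + n) + 1 := by ring
    have h2 : lb ≤ (lb + (n:Int)) + 1 := by
      have : (0:Int) ≤ n := Int.natCast_nonneg n
      omega
    push_cast
    rw [h1, ← Finset.insert_Icc_right_eq_Icc_add_one h2, Finset.sum_insert (by
      simp [Finset.mem_Icc])]
    push_cast at ih
    linarith [ih]

lemma termA_zero (L R k : Int) (h : 10 ^ (k - 1).toNat * (10 ^ k.toNat + 1) > R) :
    termA L R k = 0 := by
  have hm : (0:Int) < 10 ^ k.toNat + 1 := by positivity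
  have hub : PySem.Int.floordiv R (10 ^ k.toNat + 1) < 10 ^ (k - 1).toNat := by
    rw [PySem.Int.floordiv_lt_iff_lt_mul hm]
    linarith [h]
  have : ¬ lbA L k ≤ ubA R k := by
    simp only [lbA, ubA]
    intro hle
    have h1 := le_trans (le_max_right _ _) hle
    have h2 := le_trans h1 (min_le_left _ _)
    omega
  simp [termA, this]

lemma hminm_mono (k k' : Int) (hkk : k ≤ k') :
    (10:Int) ^ (k - 1).toNat * (10 ^ k.toNat + 1) ≤ 10 ^ (k' - 1).toNat * (10 ^ k'.toNat + 1) := by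
  have h1 : (k - 1).toNat ≤ (k' - 1).toNat := Int.toNat_le_toNat (by omega)
  have h2 : k.toNat ≤ k'.toNat := Int.toNat_le_toNat hkk
  gcongr <;> norm_num

lemma aloop_sum (L R : Int) (ks : List Int) (total : Int)
    (h2 : List.Pairwise (· ≤ ·) ks) :
    sumInvalidLoopA L R ks total = total + (ks.map (termA L R)).sum := by
  induction ks generalizing total with
  | nil => simp [sumInvalidLoopA]
  | cons k ks ih =>
    rw [sumInvalidLoopA]; dsimp only
    have hpw := (List.pairwise_cons.mp h2).2
    have hhd := (List.pairwise_cons.mp h2).1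
    split_ifs with hb h2a
    · have hz : termA L R k = 0 := termA_zero L R k hb
      have hrest : (ks.map (termA L R)).sum = 0 := by
        apply List.sum_eq_zero
        intro x hx
        obtain ⟨k', hk', rfl⟩ := List.mem_map.mp hx
        exact termA_zero L R k' (lt_of_lt_of_le hb (hminm_mono k k' (hhd k' hk')))
      simp [hz, hrest]
    · rw [ih _ hpw, List.map_cons, List.sum_cons, termA,
        if_pos (show lbA L k ≤ ubA R k from h2a)]
      simp only [lbA, ubA]
      ring
    · rw [ih _ hpw, List.map_cons, List.sum_cons, termA,
        if_neg (show ¬ lbA L k ≤ ubA R k from h2a)]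
      ring

lemma pyRange_pairwise (a b : Int) : List.Pairwise (· ≤ ·) (PySem.List.pyRange a b 1) := by
  simp only [PySem.List.pyRange]
  norm_num
  exact List.Pairwise.map (R := (· < ·)) _ (fun i j (h : i < j) => by omega)
    List.pairwise_lt_range

lemma pyRange_map_sum (f : Int → Int) (n : Nat) :
    ((PySem.List.pyRange 1 (1 + (n:Int)) 1).map f).sum = ∑ k ∈ Finset.Icc (1:Int) (n:Int), f k := by
  induction n with
  | zero => simp
  | succ n ih =>
    have h1 : (1:Int) + ((n+1:Nat):Int) = (1 + (n:Int)) + 1 := by push_cast; ring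
    have h2 : (1:Int) ≤ 1 + (n:Int) := by have := Int.natCast_nonneg n; omega
    rw [h1, PySem.List.pyRange_one_succ_right h2, List.map_append, List.sum_append, ih]
    have h3 : ((n+1:Nat):Int) = (n:Int) + 1 := by push_cast; ring
    rw [h3, ← Finset.insert_Icc_right_eq_Icc_add_one (by have := Int.natCast_nonneg n; omega),
      Finset.sum_insert (by simp [Finset.mem_Icc])]
    have h4 : (1:Int) + (n:Int) = (n:Int) + 1 := by ring
    simp [h4]
    ring

lemma A_eq_sum (L R : Int) :
    sum_invalid_in_range L R =
      ∑ k ∈ Finset.Icc (1:Int) (PySem.Int.floordiv (PySem.Str.len (PySem.Int.toStr R)) 2),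
        termA L R k := by
  rw [sum_invalid_in_range]
  set d : Int := PySem.Str.len (PySem.Int.toStr R) with hd
  have hd0 : 0 ≤ d := by rw [hd, PySem.Str.len_eq]; exact Int.natCast_nonneg _
  set D : Int := PySem.Int.floordiv d 2 with hD
  have hD0 : 0 ≤ D := by
    rw [hD, PySem.Int.floordiv_eq_ediv_of_pos (by norm_num)]
    omega
  have h1 : D + 1 = 1 + ((D.toNat : Nat) : Int) := by omega
  rw [aloop_sum _ _ _ _ (pyRange_pairwise _ _), h1, pyRange_map_sum, Int.toNat_of_nonneg hD0,
    zero_add]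

lemma ndig_succ (H : Int) (h1 : 1 ≤ H) :
    ndig (H + 1) = if H + 1 = 10 ^ ndig H then ndig H + 1 else ndig H := by
  have hh : H.toNat ≠ 0 := by omega
  have hlow := Nat.pow_log_le_self 10 hh
  have hhigh := Nat.lt_pow_succ_log_self (by norm_num : 1 < 10) H.toNat
  have htn : (H + 1).toNat = H.toNat + 1 := by omega
  have hcast : (H + 1 = (10:Int) ^ ndig H) ↔ (H.toNat + 1 = 10 ^ ndig H) := by
    rw [show ((10:Int) ^ ndig H) = ((10 ^ ndig H : Nat) : Int) by push_cast; ring]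
    omega
  by_cases he : H + 1 = (10:Int) ^ ndig H
  · rw [if_pos he]
    have := hcast.mp he
    simp only [ndig] at this ⊢
    rw [htn, this, Nat.log_pow (by norm_num)]
  · rw [if_neg he]
    have hne : H.toNat + 1 ≠ 10 ^ (Nat.log 10 H.toNat + 1) := by
      intro h
      exact he (hcast.mpr (by simpa [ndig] using h))
    simp only [ndig]
    rw [htn]
    congr 1
    apply Nat.log_eq_of_pow_le_of_lt_pow
    · omega
    · have hh2 : H.toNat < 10 ^ (Nat.log 10 H.toNat + 1) := hhigh
      omega

lemma ndig_mono (H H' : Int) (h : H ≤ H') : ndig H ≤ ndig H' := by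
  simp only [ndig]
  have := Nat.log_mono_right (b := 10) (Int.toNat_le_toNat h)
  omega

lemma gdbl_mono (H H' : Int) (h1 : 1 ≤ H) (h : H ≤ H') : gdbl H ≤ gdbl H' := by
  simp only [gdbl]
  have h2 : (10:Int) ^ ndig H ≤ 10 ^ ndig H' :=
    pow_le_pow_right₀ (by norm_num) (ndig_mono H H' h)
  have h3 : (0:Int) < 10 ^ ndig H := pow_pos (by norm_num) _
  nlinarith

lemma gdbl_ge_self (H : Int) (h1 : 1 ≤ H) : H ≤ gdbl H := by
  simp only [gdbl]
  have h3 : (0:Int) < 10 ^ ndig H := pow_pos (by norm_num) _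
  nlinarith

lemma bloop_sum (L R : Int) : ∀ (total H : Int) (k : Nat), 1 ≤ H → k = ndig H →
    sumInvalidLoopB L R total H k =
      total + ∑ H' ∈ Finset.Ico H (max R 1 + 1), wgt L R H' := by
  intro total H k
  induction total, H, k using sumInvalidLoopB.induct (L := L) (R := R) with
  | case1 total H k hguard ih =>
    intro h1 hk
    subst hk
    have hg : gdbl H ≤ R := hguard
    have hT : H < max R 1 + 1 := by
      have := le_trans (gdbl_ge_self H h1) hg
      have := le_max_left R 1
      omega
    simp only [dite_eq_ite] at ih
    rw [sumInvalidLoopB, if_pos hguard,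
      ih (by omega) (ndig_succ H h1).symm]
    rw [← Finset.insert_Ico_add_one_left_eq_Ico hT,
      Finset.sum_insert (by simp)]
    have hw : wgt L R H = if H * (10 ^ ndig H + 1) ≥ L then gdbl H else 0 := by
      simp only [wgt, gdbl, ge_iff_le]
      by_cases hL : L ≤ H * (10 ^ ndig H + 1)
      · rw [if_pos ⟨hL, hg⟩, if_pos hL]
      · rw [if_neg (by tauto), if_neg hL]
    by_cases hL : H * (10 ^ ndig H + 1) ≥ L
    · rw [if_pos hL] at hw ⊢
      rw [hw]
      show total + gdbl H + _ = _
      ring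
    · rw [if_neg hL] at hw ⊢
      rw [hw]
      ring
  | case2 total H k hguard =>
    intro h1 hk
    subst hk
    rw [sumInvalidLoopB, if_neg hguard]
    have hz : ∑ H' ∈ Finset.Ico H (max R 1 + 1), wgt L R H' = 0 := by
      apply Finset.sum_eq_zero
      intro H' hH'
      have hmem := Finset.mem_Ico.mp hH'
      have : R < gdbl H' := by
        have := gdbl_mono H H' h1 hmem.1
        have hng : R < gdbl H := by simpa [gdbl] using hguard
        omega
      simp only [wgt]
      rw [if_neg (by omega)]
    omega

lemma toDigitsCore_lb : ∀ (f n e : Nat), n < f → 10 ^ e ≤ n →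
    e + 1 ≤ (Nat.toDigitsCore 10 f n []).length := by
  intro f
  induction f with
  | zero => omega
  | succ f ih =>
    intro n e hf he
    simp only [Nat.toDigitsCore]
    by_cases hz : n / 10 = 0
    · have hn : n < 10 := by omega
      have : e = 0 := by
        by_contra h
        have : 10 ^ 1 ≤ 10 ^ e := Nat.pow_le_pow_right (by norm_num) (by omega)
        omega
      simp [hz, this]
    · rw [if_neg hz, Nat.toDigitsCore_lens_eq]
      cases e with
      | zero => omega
      | succ e =>
        have h1 : 10 ^ e ≤ n / 10 := by
          rw [Nat.le_div_iff_mul_le (by norm_num)]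
          calc 10 ^ e * 10 = 10 ^ (e+1) := by ring
          _ ≤ n := he
        have h2 : n / 10 < f := by
          have : n / 10 < n := Nat.div_lt_self (by omega) (by norm_num)
          omega
        have := ih (n / 10) e h2 h1
        omega

-- for R ≥ 1, len(str(R)) is exactly the digit count ndig R
lemma len_toStr_pos (R : Int) (h : 1 ≤ R) :
    (PySem.Int.toStr R).toList.length = ndig R := by
  rw [PySem.Int.toList_toStr]
  have hch : PySem.Int.toChars R = Nat.toDigits 10 R.toNat := by
    have hnn : ¬ R < 0 := by omega
    simp [PySem.Int.toChars, hnn]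
  rw [hch]
  have hub : (Nat.toDigits 10 R.toNat).length ≤ Nat.log 10 R.toNat + 1 :=
    Nat.toDigits_length 10 R.toNat _ (by omega) (Nat.lt_pow_succ_log_self (by norm_num) _)
  have hlb : Nat.log 10 R.toNat + 1 ≤ (Nat.toDigits 10 R.toNat).length := by
    apply toDigitsCore_lb
    · omega
    · exact Nat.pow_log_le_self 10 (by omega)
  simp only [ndig]
  omega

lemma ceil_le_iff (m L H : Int) (hm : 0 < m) :
    PySem.Int.floordiv (L + m - 1) m ≤ H ↔ L ≤ H * m := by
  have h1 : (PySem.Int.floordiv (L + m - 1) m ≤ H) ↔ (PySem.Int.floordiv (L + m - 1) m < H + 1) := by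
    omega
  rw [h1, PySem.Int.floordiv_lt_iff_lt_mul hm]
  have h2 : (H + 1) * m = H * m + m := by ring
  omega

lemma ndig_eq (j : Nat) (H : Int) (hj : 1 ≤ j) (h1 : (10:Int) ^ (j - 1) ≤ H)
    (h2 : H < 10 ^ j) : ndig H = j := by
  have hc1 : ((10 ^ (j-1) : Nat) : Int) ≤ H := by push_cast; exact h1
  have hc2 : H < ((10 ^ j : Nat) : Int) := by push_cast; exact h2
  have hp : (0:Nat) < 10 ^ (j-1) := by positivity
  have hn1 : 10 ^ (j-1) ≤ H.toNat := by omega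
  have hn2 : H.toNat < 10 ^ j := by omega
  simp only [ndig]
  have : Nat.log 10 H.toNat = j - 1 := by
    apply Nat.log_eq_of_pow_le_of_lt_pow hn1
    have : j - 1 + 1 = j := by omega
    rw [this]
    exact hn2
  omega

lemma ndig_bounds (H : Int) (h : 1 ≤ H) :
    (10:Int) ^ (ndig H - 1) ≤ H ∧ H < 10 ^ ndig H := by
  have hh : H.toNat ≠ 0 := by omega
  have hlow := Nat.pow_log_le_self 10 hh
  have hhigh := Nat.lt_pow_succ_log_self (by norm_num : 1 < 10) H.toNat
  simp only [ndig]
  constructor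
  · have : ((10 ^ (Nat.log 10 H.toNat) : Nat) : Int) ≤ H := by omega
    simpa using this
  · have : H < ((10 ^ (Nat.log 10 H.toNat + 1) : Nat) : Int) := by omega
    simpa using this

-- the fiber of halves with exactly j digits contributes exactly A's term for k = j
lemma fiber_term (L R : Int) (j : Nat) (hj : 1 ≤ j) :
    ∑ H ∈ (Finset.Ico (1:Int) (max R 1 + 1)).filter (fun H => (ndig H : Int) = (j:Int)),
      wgt L R H = termA L R (j:Int) := by
  have htn1 : ((j:Int)).toNat = j := by omega
  have htn2 : ((j:Int) - 1).toNat = j - 1 := by omega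
  have hm : (0:Int) < 10 ^ j + 1 := by positivity
  have hstep1 : ∀ H ∈ (Finset.Ico (1:Int) (max R 1 + 1)).filter (fun H => (ndig H : Int) = (j:Int)),
      wgt L R H = if lbA L j ≤ H ∧ H ≤ ubA R j then (10 ^ j + 1) * H else 0 := by
    intro H hH
    obtain ⟨hIco, hnd⟩ := Finset.mem_filter.mp hH
    obtain ⟨hH1, _⟩ := Finset.mem_Ico.mp hIco
    have hndj : ndig H = j := by omega
    have hb := ndig_bounds H hH1
    rw [hndj] at hb
    simp only [wgt, gdbl, hndj, lbA, ubA, htn1, htn2]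
    have hiff : (L ≤ H * (10 ^ j + 1) ∧ H * (10 ^ j + 1) ≤ R) ↔
        (max (PySem.Int.floordiv (L + (10 ^ j + 1) - 1) (10 ^ j + 1)) (10 ^ (j-1)) ≤ H ∧
         H ≤ min (PySem.Int.floordiv R (10 ^ j + 1)) (10 ^ j - 1)) := by
      rw [max_le_iff, le_min_iff, ceil_le_iff _ _ _ hm, PySem.Int.le_floordiv_iff_mul_le hm]
      constructor
      · intro ⟨hL, hR⟩
        exact ⟨⟨hL, by omega⟩, ⟨hR, by omega⟩⟩
      · intro ⟨⟨hL, _⟩, ⟨hR, _⟩⟩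
        exact ⟨hL, hR⟩
    rw [if_congr hiff rfl rfl]
    by_cases hc : max (PySem.Int.floordiv (L + (10 ^ j + 1) - 1) (10 ^ j + 1)) (10 ^ (j-1)) ≤ H ∧
         H ≤ min (PySem.Int.floordiv R (10 ^ j + 1)) (10 ^ j - 1)
    · rw [if_pos hc, if_pos hc]; ring
    · rw [if_neg hc, if_neg hc]
  rw [Finset.sum_congr rfl hstep1, ← Finset.sum_filter]
  have hset : ((Finset.Ico (1:Int) (max R 1 + 1)).filter (fun H => (ndig H : Int) = (j:Int))).filter
      (fun H => lbA L j ≤ H ∧ H ≤ ubA R j) = Finset.Icc (lbA L (j:Int)) (ubA R (j:Int)) := by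
    apply Finset.ext
    intro H
    simp only [Finset.mem_filter, Finset.mem_Ico, Finset.mem_Icc]
    constructor
    · rintro ⟨⟨_, _⟩, hlb, hub⟩
      exact ⟨hlb, hub⟩
    · rintro ⟨hlb, hub⟩
      have hpj : (0:Int) < 10 ^ (j-1) := by positivity
      have hlb2 : (10:Int) ^ (j-1) ≤ H := by
        have := le_trans (le_max_right _ _) hlb
        simpa [lbA, htn2] using this
      have hub2 : H ≤ 10 ^ j - 1 := by
        have := le_trans hub (min_le_right _ _)
        simpa [ubA, htn1] using this
      have hH1 : (1:Int) ≤ H := by omega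
      have hndj : ndig H = j := ndig_eq j H hj hlb2 (by omega)
      have hRba : H * (10 ^ j + 1) ≤ R := by
        have h5 : H ≤ PySem.Int.floordiv R (10 ^ j + 1) := by
          have := le_trans hub (min_le_left _ _)
          simpa [ubA, htn1] using this
        exact (PySem.Int.le_floordiv_iff_mul_le hm).mp h5
      have hHR : H ≤ R := by nlinarith
      refine ⟨⟨⟨hH1, ?_⟩, by omega⟩, hlb, hub⟩
      have := le_max_left R 1
      omega
  rw [hset]
  by_cases hle : lbA L (j:Int) ≤ ubA R (j:Int)
  · rw [termA, if_pos hle]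
    obtain ⟨n, hn⟩ : ∃ n : Nat, ubA R (j:Int) = lbA L (j:Int) + n :=
      ⟨(ubA R (j:Int) - lbA L (j:Int)).toNat, by omega⟩
    have hg := gauss_int (lbA L (j:Int)) n
    have hsum : ∑ H ∈ Finset.Icc (lbA L (j:Int)) (ubA R (j:Int)), (10 ^ ((j:Int)).toNat + 1) * H =
        (10 ^ j + 1) * ∑ H ∈ Finset.Icc (lbA L (j:Int)) (ubA R (j:Int)), H := by
      rw [Finset.mul_sum, htn1]
    have harg : (10 ^ ((j:Int)).toNat + 1) * (ubA R (j:Int) - lbA L (j:Int) + 1) *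
        (lbA L (j:Int) + ubA R (j:Int)) =
        ((10 ^ j + 1) * ∑ H ∈ Finset.Icc (lbA L (j:Int)) (ubA R (j:Int)), H) * 2 := by
      rw [htn1, hn]
      linear_combination (-(10 ^ j + 1)) * hg
    rw [harg, PySem.Int.floordiv_eq_ediv_of_pos (by norm_num), Int.mul_ediv_cancel _ (by norm_num)]
    rw [Finset.mul_sum]
  · rw [termA, if_neg hle]
    rw [Finset.Icc_eq_empty hle, Finset.sum_empty]

-- B's enumeration regrouped by digit count equals A's per-k sums
lemma bridge (L R : Int) :
    ∑ H ∈ Finset.Ico (1:Int) (max R 1 + 1), wgt L R H =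
      ∑ k ∈ Finset.Icc (1:Int) (PySem.Int.floordiv (PySem.Str.len (PySem.Int.toStr R)) 2),
        termA L R k := by
  by_cases hR : 1 ≤ R
  case neg =>
    have hT : max R 1 = 1 := by omega
    rw [hT]
    have hl : ∑ H ∈ Finset.Ico (1:Int) (1 + 1), wgt L R H = 0 := by
      apply Finset.sum_eq_zero
      intro H hH
      have hmem := Finset.mem_Ico.mp hH
      have hH1 : H = 1 := by omega
      have hg : (0:Int) < gdbl H := by
        have : (0:Int) < 10 ^ ndig H := pow_pos (by norm_num) _
        subst hH1; simp only [gdbl]; nlinarith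
      simp only [wgt]
      rw [if_neg (by omega)]
    rw [hl]
    symm
    apply Finset.sum_eq_zero
    intro k hk
    have hk1 : 1 ≤ k := (Finset.mem_Icc.mp hk).1
    apply termA_zero
    have hp1 : (0:Int) < 10 ^ (k-1).toNat := pow_pos (by norm_num) _
    have hp2 : (0:Int) < 10 ^ k.toNat := pow_pos (by norm_num) _
    nlinarith
  case pos =>
    have hlen : PySem.Str.len (PySem.Int.toStr R) = ((ndig R : Nat) : Int) := by
      rw [PySem.Str.len_eq, len_toStr_pos R hR]
    rw [hlen]
    rw [← Finset.sum_fiberwise_of_maps_to (g := fun H => ((ndig H : Nat) : Int))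
      (t := Finset.Icc (1:Int) ((ndig R : Nat) : Int)) (fun H hH => by
        obtain ⟨h1, h2⟩ := Finset.mem_Ico.mp hH
        have hmx : max R 1 = R := by omega
        have hmono := ndig_mono H R (by omega)
        simp only [Finset.mem_Icc]
        have hge : 1 ≤ ndig H := by simp only [ndig]; omega
        omega)]
    have hfib : ∀ k ∈ Finset.Icc (1:Int) ((ndig R : Nat) : Int),
        (∑ H ∈ (Finset.Ico (1:Int) (max R 1 + 1)).filter
            (fun H => ((ndig H : Nat) : Int) = k), wgt L R H) = termA L R k := by
      intro k hk
      obtain ⟨h1, h2⟩ := Finset.mem_Icc.mp hk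
      have hjk : ((k.toNat : Nat) : Int) = k := by omega
      rw [← hjk]
      exact fiber_term L R k.toNat (by omega)
    rw [Finset.sum_congr rfl hfib]
    refine (Finset.sum_subset ?_ ?_).symm
    · intro k hk
      obtain ⟨h1, h2⟩ := Finset.mem_Icc.mp hk
      have hD : PySem.Int.floordiv ((ndig R : Nat) : Int) 2 ≤ ((ndig R : Nat) : Int) := by
        rw [PySem.Int.floordiv_eq_ediv_of_pos (by norm_num)]
        omega
      exact Finset.mem_Icc.mpr ⟨h1, le_trans h2 hD⟩
    · intro k hk hnk
      obtain ⟨h1, h2⟩ := Finset.mem_Icc.mp hk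
      have h3 : PySem.Int.floordiv ((ndig R : Nat) : Int) 2 < k := by
        by_contra h
        exact hnk (Finset.mem_Icc.mpr ⟨h1, by omega⟩)
      rw [PySem.Int.floordiv_eq_ediv_of_pos (by norm_num)] at h3
      -- 2k - 1 ≥ ndig R, hence h_min·m > 10^(2k-1) ≥ 10^(ndig R) > R
      obtain ⟨a, b, ha, hb⟩ : ∃ a b : Nat, (a : Int) = k - 1 ∧ (b : Int) = k :=
        ⟨(k-1).toNat, k.toNat, by omega, by omega⟩
      apply termA_zero
      have e1 : (k-1).toNat = a := by omega
      have e2 : k.toNat = b := by omega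
      rw [e1, e2]
      have hRlt : R < ((10 ^ ndig R : Nat) : Int) := by
        have hh := Nat.lt_pow_succ_log_self (by norm_num : 1 < 10) R.toNat
        simp only [ndig]
        omega
      have hpowle : ((10 ^ ndig R : Nat) : Int) ≤ ((10 ^ (a + b) : Nat) : Int) := by
        have hle : ndig R ≤ a + b := by omega
        have := Nat.pow_le_pow_right (by norm_num : 1 ≤ 10) hle
        omega
      have hsplit : ((10 ^ (a + b) : Nat) : Int) ≤ (10:Int) ^ a * (10 ^ b + 1) := by
        push_cast [pow_add]
        have hpa : (0:Int) < 10 ^ a := pow_pos (by norm_num) _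
        have hpb : (0:Int) < 10 ^ b := pow_pos (by norm_num) _
        nlinarith
      linarith [hRlt, hpowle, hsplit]

-- ===== VERDICT (by name: the statement is the Claim_ definition above) =====
theorem sum_invalid_in_range_spec : Claim_equal_sum_invalid_in_range := by
  intro L R _
  show sum_invalid_in_range L R = sum_invalid_in_range_alt L R
  rw [A_eq_sum, ← bridge]
  rw [sum_invalid_in_range_alt, bloop_sum L R 0 1 1 le_rfl (by simp [ndig])]
  ring
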